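-- pv_equiv track=rewrite | github.com/AngelaHCobos/DailyPractice | practicaM10.py | nonPalindromicMultiples
-- ===== SOURCE A (Python) =====
-- def nonPalindromicMultiples(n):
--     counter = 0
--     for x in range(1000, 10000):
--         unit = x % 10
--         ten = (x % 100) // 10
--         hundred = (x % 1000) // 100
--         thousand = x // 1000
--         if (unit != thousand or ten != hundred) and (x % n == 0):
--             counter += 1
--     return counter
-- ===== SOURCE B (Python) =====
-- def nonPalindromicMultiples(n):
--     m = abs(n)
--     total = 9999 // m - 999 // m          # multiples of m in [1000, 9999]
--     pal = 0
--     for a in range(1, 10):                # 4-digit palindromes are 1001*a + 110*b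
--         for b in range(0, 10):
--             if (1001 * a + 110 * b) % m == 0:
--                 pal += 1
--     return total - pal
-- ===== Notes on version B (the rewrite author's own statement) =====
-- stated objective: faster
-- what changed: Replaces the 9000-iteration scan over all 4-digit numbers by the division formula for the count of multiples of |n| in [1000,9999] minus a 90-iteration loop over the 4-digit palindromes 1001*a+110*b.
import Mathlib
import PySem

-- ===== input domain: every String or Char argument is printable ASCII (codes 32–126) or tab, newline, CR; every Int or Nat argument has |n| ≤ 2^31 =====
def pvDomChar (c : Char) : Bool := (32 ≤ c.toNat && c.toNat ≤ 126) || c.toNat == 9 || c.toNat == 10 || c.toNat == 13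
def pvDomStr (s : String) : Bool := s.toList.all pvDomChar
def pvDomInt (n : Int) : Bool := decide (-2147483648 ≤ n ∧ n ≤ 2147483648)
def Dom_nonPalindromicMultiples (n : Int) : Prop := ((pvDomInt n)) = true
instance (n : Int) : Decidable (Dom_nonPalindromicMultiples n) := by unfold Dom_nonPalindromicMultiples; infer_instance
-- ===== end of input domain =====

-- B replaces A's 9000-iteration scan by the division formula for the count of
-- multiples of |n| in [1000, 9999] minus a 90-iteration loop over the 4-digit
-- palindromes 1001*a + 110*b (objective: faster by a constant factor).

-- ===== PORT A =====
def nonPalindromicMultiples (n : Int) : Int :=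
  (PySem.List.pyRange 1000 10000 1).foldl (fun counter x =>
    let unit := PySem.Int.mod x 10
    let ten := PySem.Int.floordiv (PySem.Int.mod x 100) 10
    let hundred := PySem.Int.floordiv (PySem.Int.mod x 1000) 100
    let thousand := PySem.Int.floordiv x 1000
    if (unit ≠ thousand ∨ ten ≠ hundred) ∧ PySem.Int.mod x n = 0 then counter + 1
    else counter) 0

-- ===== PORT B =====
def nonPalindromicMultiples_alt (n : Int) : Int :=
  let m := |n|
  let total := PySem.Int.floordiv 9999 m - PySem.Int.floordiv 999 m
  let pal := (PySem.List.pyRange 1 10 1).foldl (fun pal a =>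
    (PySem.List.pyRange 0 10 1).foldl (fun pal b =>
      if PySem.Int.mod (1001 * a + 110 * b) m = 0 then pal + 1 else pal) pal) 0
  total - pal

-- ===== PRECONDITION & SPEC =====
-- Python A raises ZeroDivisionError on n = 0 (x % n); excluded.
def Pre_nonPalindromicMultiples (n : Int) : Prop := n ≠ 0
instance (n : Int) : Decidable (Pre_nonPalindromicMultiples n) := by
  unfold Pre_nonPalindromicMultiples; infer_instance
def pvWitness_nonPalindromicMultiples : Int := (7)

def Spec_nonPalindromicMultiples (n : Int) (out : Int) : Prop := out = nonPalindromicMultiples_alt n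
instance (n : Int) (out : Int) : Decidable (Spec_nonPalindromicMultiples n out) := by unfold Spec_nonPalindromicMultiples; infer_instance

-- ===== CLAIM (what is proved, stated in full; the proofs are below) =====
def Claim_equal_nonPalindromicMultiples : Prop := ∀ (n : Int), Dom_nonPalindromicMultiples n → Pre_nonPalindromicMultiples n → Spec_nonPalindromicMultiples n (nonPalindromicMultiples n)

-- ===== LEMMAS AND PROOFS =====

-- non-palindrome test of A, as a Bool predicate on the Int x
def pvNonPal (x : Int) : Bool :=
  decide (PySem.Int.mod x 10 ≠ PySem.Int.floordiv x 1000 ∨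
    PySem.Int.floordiv (PySem.Int.mod x 100) 10 ≠ PySem.Int.floordiv (PySem.Int.mod x 1000) 100)

-- the 90 four-digit palindromes, enumerated the way B's double loop visits them
def pvPalList : List Int :=
  (PySem.List.pyRange 1 10 1).flatMap (fun a =>
    (PySem.List.pyRange 0 10 1).map (fun b => 1001 * a + 110 * b))

-- the palindromes among [1000, 9999] are exactly pvPalList (a closed computation)
set_option maxRecDepth 100000 in
theorem pvPalFilter :
    (PySem.List.pyRange 1000 10000 1).filter (fun x => !pvNonPal x) = pvPalList := by
  decide

theorem pvCountSplit {α : Type} (p q : α → Bool) (l : List α) :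
    l.countP p = l.countP (fun x => p x && q x) + l.countP (fun x => p x && !q x) := by
  induction l with
  | nil => rfl
  | cons h t ih =>
    simp only [List.countP_cons, ih]
    cases hp : p h <;> cases hq : q h <;> simp <;> omega

theorem pvFoldlCnt (P : Int → Prop) [DecidablePred P] (l : List Int) (a : Int) :
    l.foldl (fun acc x => if P x then acc + 1 else acc) a
      = a + (l.countP (fun x => decide (P x)) : Int) := by
  induction l generalizing a with
  | nil => simp
  | cons h t ih => by_cases hP : P h <;> simp [hP, ih] <;> ring

theorem pvCountDvdRange (m a N : Nat) :
    (List.range N).countP (fun k => decide (m ∣ (a + k + 1))) = (a + N) / m - a / m := by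
  induction N with
  | zero => simp
  | succ N ih =>
    rw [List.range_succ, List.countP_append, ih]
    have h1 : (a + N + 1) / m = (a + N) / m + if m ∣ a + N + 1 then 1 else 0 := Nat.succ_div
    have h2 : a / m ≤ (a + N) / m := Nat.div_le_div_right (by omega)
    have h3 : a + (N + 1) = a + N + 1 := by omega
    rw [h3]
    simp only [List.countP_cons, List.countP_nil]
    by_cases hd : m ∣ a + N + 1 <;> simp [hd] at h1 ⊢ <;> omega

theorem pvDoubleFold (P : Int → Prop) [DecidablePred P]
    (outer inner : List Int) (f : Int → Int → Int) (init : Int) :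
    outer.foldl (fun pal a => inner.foldl (fun pal b => if P (f a b) then pal + 1 else pal) pal) init
      = init + ((outer.flatMap (fun a => inner.map (f a))).countP (fun x => decide (P x)) : Int) := by
  induction outer generalizing init with
  | nil => simp
  | cons h t ih =>
    rw [List.foldl_cons, ih, pvFoldlCnt, List.flatMap_cons, List.countP_append,
      List.countP_map]
    have hc : List.countP ((fun x => decide (P x)) ∘ f h) inner
        = List.countP (fun x => decide (P (f h x))) inner := rfl
    rw [hc]
    push_cast
    ring

-- A's loop is a countP over the range
theorem pvA_eq (n : Int) : nonPalindromicMultiples n =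
    ((PySem.List.pyRange 1000 10000 1).countP
      (fun x => pvNonPal x && decide ((|n|) ∣ x)) : Int) := by
  unfold nonPalindromicMultiples
  rw [pvFoldlCnt (fun x =>
    (PySem.Int.mod x 10 ≠ PySem.Int.floordiv x 1000 ∨
      PySem.Int.floordiv (PySem.Int.mod x 100) 10 ≠ PySem.Int.floordiv (PySem.Int.mod x 1000) 100)
    ∧ PySem.Int.mod x n = 0)]
  rw [zero_add]
  exact congrArg (fun c : Nat => (c : Int)) (List.countP_congr (fun x _ => by
    simp [pvNonPal, PySem.Int.mod_eq_zero_iff_dvd, abs_dvd]))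

-- ===== VERDICT (by name: the statement is the Claim_ definition above) =====
theorem nonPalindromicMultiples_spec : Claim_equal_nonPalindromicMultiples := by
  intro n _ hn
  unfold Spec_nonPalindromicMultiples
  set L := PySem.List.pyRange 1000 10000 1 with hL
  set m : Nat := n.natAbs with hmdef
  have hm : 0 < m := Int.natAbs_pos.mpr hn
  have habs : |n| = (m : Int) := Int.abs_eq_natAbs n
  set dB : Int → Bool := fun x => decide ((|n|) ∣ x) with hdB
  -- the three counts
  have hsplit : L.countP dB
      = L.countP (fun x => dB x && pvNonPal x) + L.countP (fun x => dB x && !pvNonPal x) :=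
    pvCountSplit dB pvNonPal L
  have hA : nonPalindromicMultiples n = (L.countP (fun x => dB x && pvNonPal x) : Int) := by
    rw [pvA_eq n]
    exact congrArg (fun c : Nat => (c : Int)) (List.countP_congr (fun x _ => by
      simp [hdB, Bool.and_comm]))
  have hpalcnt : L.countP (fun x => dB x && !pvNonPal x) = pvPalList.countP dB := by
    rw [← pvPalFilter, List.countP_filter]
  -- total number of multiples in the range
  have hall : L.countP dB = 9999 / m - 999 / m := by
    rw [hL, PySem.List.pyRange_one, List.countP_map]
    have : ((10000 : Int) - 1000).toNat = 9000 := by decide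
    rw [this]
    have hcongr : (List.range 9000).countP (dB ∘ fun k : Nat => (1000 : Int) + ↑k)
        = (List.range 9000).countP (fun k => decide (m ∣ (999 + k + 1))) := by
      apply List.countP_congr
      intro k _
      have hx : ((1000 : Int) + (k : Int)) = ((999 + k + 1 : Nat) : Int) := by push_cast; ring
      simp only [Function.comp, hdB, habs, hx, Int.natCast_dvd_natCast]
    rw [hcongr, pvCountDvdRange]
  have hle : 999 / m ≤ 9999 / m := Nat.div_le_div_right (by omega)
  -- B's value
  simp only [nonPalindromicMultiples_alt]
  rw [pvDoubleFold (fun x => PySem.Int.mod x (|n|) = 0) (PySem.List.pyRange 1 10 1)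
    (PySem.List.pyRange 0 10 1) (fun a b => 1001 * a + 110 * b) 0]
  have hBpal : ((PySem.List.pyRange 1 10 1).flatMap
        (fun a => (PySem.List.pyRange 0 10 1).map (fun b => 1001 * a + 110 * b))).countP
        (fun x => decide (PySem.Int.mod x (|n|) = 0))
      = pvPalList.countP dB := by
    apply List.countP_congr
    intro x _
    simp [hdB, PySem.Int.mod_eq_zero_iff_dvd]
  have hfd : ∀ (a : Int), 0 ≤ a → PySem.Int.floordiv a (|n|) = ((a.toNat / m : Nat) : Int) := by
    intro a ha
    rw [PySem.Int.floordiv_eq_ediv_of_pos (by omega : (0:Int) < |n|), habs, Int.natCast_div,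
      show ((a.toNat : Int)) = a from by omega]
  rw [hBpal, hfd 9999 (by omega), hfd 999 (by omega)]
  have h9999 : (9999 : Int).toNat = 9999 := by decide
  have h999 : (999 : Int).toNat = 999 := by decide
  rw [h9999, h999, hA]
  rw [hpalcnt] at hsplit
  omega
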